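-- pv_equiv track=rewrite | github.com/Gyeong10/Algorithm_study | 김이랑/PRO/2019_겨울_카카오인턴십/호텔방배정_2.py | check
-- ===== SOURCE A (Python) =====
-- def check(number, rooms):
--     if number not in rooms:
--         rooms[number] = number + 1
--         return number
--     else:
--         room = check(rooms[number], rooms)
--         rooms[number] = room + 1
--         return room
-- ===== SOURCE B (Python) =====
-- def check(number, rooms):
--     # Build the whole lookup chain explicitly, newest room first; the head of the
--     # finished chain is the free room. Then compress every visited node past it.
--     path = [number]
--     while path[0] in rooms:
--         path.insert(0, rooms[path[0]])
--     room = path[0]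
--     for node in path:
--         rooms[node] = room + 1
--     return room
-- ===== Notes on version B (the rewrite author's own statement) =====
-- stated objective: alternative
-- what changed: Replaces A's recursion (compressing on the unwind) by materialising the whole lookup chain as an explicit list built newest-first, taking its head as the free room, and compressing the list in a second pass.
import Mathlib
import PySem

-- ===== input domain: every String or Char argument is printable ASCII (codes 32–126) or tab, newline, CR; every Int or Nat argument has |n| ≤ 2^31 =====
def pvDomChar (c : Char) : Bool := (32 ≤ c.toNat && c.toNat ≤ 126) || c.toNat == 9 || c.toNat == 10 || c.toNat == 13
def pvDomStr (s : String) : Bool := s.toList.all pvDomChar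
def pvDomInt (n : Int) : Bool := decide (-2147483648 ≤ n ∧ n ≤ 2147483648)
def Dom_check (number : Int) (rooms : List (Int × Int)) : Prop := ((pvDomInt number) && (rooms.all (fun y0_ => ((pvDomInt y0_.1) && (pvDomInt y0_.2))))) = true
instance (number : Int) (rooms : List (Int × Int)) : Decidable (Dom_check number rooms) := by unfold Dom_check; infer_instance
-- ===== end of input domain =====

-- B replaces A's recursion-with-compression-on-unwind by materialising the lookup chain as
-- an explicit list (newest-first) whose head is the free room, compressed in a second pass
-- (alternative decomposition, same lookup cost); equivalence is about the RETURN value only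
-- (both Pythons mutate `rooms` in place, in the same way).

-- ===== PORT A =====
-- A's recursion, fuel-bounded (fuel = |rooms|+1 suffices whenever the Python returns, since
-- the chain visits distinct keys; fuel exhaustion = Python RecursionError, outside Pre_).
-- The mutated dict is threaded through the recursion exactly as in A.
def checkA_aux : Nat → Int → PySem.Dict Int Int → Int × PySem.Dict Int Int
  | 0, number, rooms => (number, rooms)  -- fuel exhausted: Python raises here (excluded by Pre_)
  | fuel + 1, number, rooms =>
    match rooms.get? number with
    | none => (number, rooms.insert number (number + 1))
    | some v =>
      let r := checkA_aux fuel v rooms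
      (r.1, r.2.insert number (r.1 + 1))

def check (number : Int) (rooms : List (Int × Int)) : Int :=
  (checkA_aux (rooms.length + 1) number (PySem.Dict.mk rooms)).1

-- ===== PORT B =====
-- Source B's while-loop growing `path` at the front; fuel-bounded like A (loop never ends on a
-- cycle, outside Pre_). `path` is always nonempty (starts as [number]).
def checkB_chain (rooms : PySem.Dict Int Int) : Nat → List Int → List Int
  | 0, path => path
  | fuel + 1, path =>
    let cur := path.headD 0
    if rooms.contains cur then checkB_chain rooms fuel (rooms.getD cur 0 :: path)
    else path

def check_alt (number : Int) (rooms : List (Int × Int)) : Int :=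
  let d := PySem.Dict.mk rooms
  let path := checkB_chain d (rooms.length + 1) [number]
  -- Source B then writes rooms[node] = path[0]+1 for every node of path; those in-place
  -- writes do not affect the returned value, ported return-value-only.
  path.headD 0

-- ===== PRECONDITION & SPEC =====
-- Pre_ excludes exactly the inputs on which Python A never returns: when the successor chain
-- from `number` never leaves the key set (a cycle), A raises RecursionError (and Source B loops).
def Pre_check (number : Int) (rooms : List (Int × Int)) : Prop :=
  ∃ k ≤ rooms.length,
    (PySem.Dict.mk rooms).get? ((fun n => (PySem.Dict.mk rooms).getD n n)^[k] number) = none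
instance (number : Int) (rooms : List (Int × Int)) : Decidable (Pre_check number rooms) := by
  unfold Pre_check; infer_instance
def pvWitness_check : Int × (List (Int × Int)) := (5, [(5, 6), (6, 7)])
def Spec_check (number : Int) (rooms : List (Int × Int)) (out : Int) : Prop := out = check_alt number rooms
instance (number : Int) (rooms : List (Int × Int)) (out : Int) : Decidable (Spec_check number rooms out) := by unfold Spec_check; infer_instance

-- ===== CLAIM (what is proved, stated in full; the proofs are below) =====
def Claim_equal_check : Prop := ∀ (number : Int) (rooms : List (Int × Int)), Dom_check number rooms → Pre_check number rooms → Spec_check number rooms (check number rooms)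

-- ===== LEMMAS AND PROOFS =====

-- The room A's recursion returns ignores the threaded dict writes (all reads happen before
-- any write) and equals the head of B's finished chain, for any fuel and any chain tail.
theorem checkA_aux_fst_eq_chain_head (d : PySem.Dict Int Int) (fuel : Nat) :
    ∀ (n : Int) (rest : List Int),
      (checkA_aux fuel n d).1 = (checkB_chain d fuel (n :: rest)).headD 0 := by
  induction fuel with
  | zero => intro n rest; simp [checkA_aux, checkB_chain]
  | succ f ih =>
    intro n rest
    simp only [checkA_aux, checkB_chain, List.headD_cons]
    cases h : d.get? n with
    | none => simp [PySem.Dict.contains_eq_isSome_get?, h]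
    | some v =>
      simp only [PySem.Dict.contains_eq_isSome_get?, h, Option.isSome_some, if_pos,
        PySem.Dict.getD_eq_get?_getD, Option.getD_some]
      exact ih v (n :: rest)

-- ===== VERDICT (by name: the statement is the Claim_ definition above) =====
theorem check_spec : Claim_equal_check := by
  intro number rooms _ _
  unfold Spec_check check check_alt
  exact checkA_aux_fst_eq_chain_head _ _ number []
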